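-- pv_equiv track=rewrite | github.com/desmetr/SchakenPython | chesspiece.py | possibleMovesRightUp
-- ===== SOURCE A (Python) =====
-- def possibleMovesRightUp(r, c):
-- 	possibleMoves = []; rowsDone = []; columnsDone = []
-- 	possibleRowsToGoUp = r
-- 	possibleColumnsToGoRight = 7 - c
-- 	for i in range(possibleRowsToGoUp, -1, -1):
-- 		for j in range(c, 8):
-- 			if possibleRowsToGoUp - possibleColumnsToGoRight <= i < possibleRowsToGoUp and \
-- 				c < j <= c + possibleColumnsToGoRight and i not in rowsDone and j not in columnsDone:
-- 					possibleMoves.append((i, j))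
-- 					rowsDone.append(i)
-- 					columnsDone.append(j)
--
-- 	if (r,c) in possibleMoves:
-- 		possibleMoves.remove((r,c))
--
-- 	return list(set(possibleMoves))
-- ===== SOURCE B (Python) =====
-- def possibleMovesRightUp(r, c):
-- 	moves = [(r - k, c + k) for k in range(1, min(r, 7 - c) + 1)]
-- 	return list(set(moves))
-- ===== Notes on version B (the rewrite author's own statement) =====
-- stated objective: faster
-- what changed: Replaces the nested double loop with rowsDone/columnsDone bookkeeping and the no-op (r,c) removal by a single comprehension emitting the diagonal squares (r-k, c+k) for k = 1 .. min(r, 7-c), then the same list(set(...)) wrapper.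
import Mathlib
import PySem

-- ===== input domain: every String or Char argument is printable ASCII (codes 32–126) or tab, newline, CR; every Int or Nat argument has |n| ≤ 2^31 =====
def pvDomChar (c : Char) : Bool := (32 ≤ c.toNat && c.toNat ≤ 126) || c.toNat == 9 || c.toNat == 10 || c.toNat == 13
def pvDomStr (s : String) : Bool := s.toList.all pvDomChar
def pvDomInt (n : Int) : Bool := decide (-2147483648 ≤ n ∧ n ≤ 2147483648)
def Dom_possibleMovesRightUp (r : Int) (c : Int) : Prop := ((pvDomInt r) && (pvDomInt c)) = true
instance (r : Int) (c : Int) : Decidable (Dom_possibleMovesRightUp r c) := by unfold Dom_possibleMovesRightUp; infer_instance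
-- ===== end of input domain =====

-- B replaces A's nested double loop and done-bookkeeping by one comprehension over k = 1 .. min(r, 7-c); equivalence is about the return value (neither mutates anything).

-- ===== PORT A =====
-- one inner-loop step: the guarded append of (i, j) with the rowsDone/columnsDone bookkeeping
def pvStepA (r c i : Int) (st : List (Int × Int) × List Int × List Int) (j : Int) :
    List (Int × Int) × List Int × List Int :=
  if r - (7 - c) ≤ i ∧ i < r ∧ c < j ∧ j ≤ c + (7 - c) ∧ i ∉ st.2.1 ∧ j ∉ st.2.2
  then (st.1 ++ [(i, j)], st.2.1 ++ [i], st.2.2 ++ [j]) else st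

def possibleMovesRightUp (r : Int) (c : Int) : List (Int × Int) :=
  let st := (PySem.List.pyRange r (-1) (-1)).foldl
    (fun st i => (PySem.List.pyRange c 8 1).foldl (pvStepA r c i) st) ([], [], [])
  let ms := st.1
  let ms := if (r, c) ∈ ms then (PySem.List.remove? ms (r, c)).getD ms else ms
  PySem.Set.ofList ms

-- ===== PORT B =====
def possibleMovesRightUp_alt (r : Int) (c : Int) : List (Int × Int) :=
  PySem.Set.ofList ((PySem.List.pyRange 1 (min r (7 - c) + 1) 1).map (fun k => (r - k, c + k)))

-- ===== PRECONDITION & SPEC =====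
def Spec_possibleMovesRightUp (r : Int) (c : Int) (out : List (Int × Int)) : Prop := out = possibleMovesRightUp_alt r c
instance (r : Int) (c : Int) (out : List (Int × Int)) : Decidable (Spec_possibleMovesRightUp r c out) := by unfold Spec_possibleMovesRightUp; infer_instance

-- ===== CLAIM (what is proved, stated in full; the proofs are below) =====
def Claim_equal_possibleMovesRightUp : Prop := ∀ (r : Int) (c : Int), Dom_possibleMovesRightUp r c → Spec_possibleMovesRightUp r c (possibleMovesRightUp r c)

-- ===== LEMMAS AND PROOFS =====

-- the state after the first t diagonal moves have been generated (t : Int; empty for t ≤ 0)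
def pvS (r c t : Int) : List (Int × Int) × List Int × List Int :=
  ((PySem.List.pyRange 1 (t + 1) 1).map (fun k => (r - k, c + k)),
   (PySem.List.pyRange 1 (t + 1) 1).map (fun k => r - k),
   (PySem.List.pyRange 1 (t + 1) 1).map (fun k => c + k))

lemma pv_foldl_id {α β : Type} (f : β → α → β) (st : β) :
    ∀ L : List α, (∀ j ∈ L, f st j = st) → L.foldl f st = st := by
  intro L
  induction L with
  | nil => intro _; rfl
  | cons a t ih =>
      intro h
      simp only [List.foldl_cons, h a (by simp)]
      exact ih (fun j hj => h j (by simp [hj]))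

lemma pv_mem_rows (r c t x : Int) :
    x ∈ (pvS r c t).2.1 ↔ ∃ k : Int, 1 ≤ k ∧ k ≤ t ∧ x = r - k := by
  simp only [pvS, List.mem_map, PySem.List.mem_pyRange_one]
  constructor
  · rintro ⟨k, ⟨h1, h2⟩, he⟩; exact ⟨k, h1, by omega, he.symm⟩
  · rintro ⟨k, h1, h2, he⟩; exact ⟨k, ⟨h1, by omega⟩, he.symm⟩

lemma pv_mem_cols (r c t x : Int) :
    x ∈ (pvS r c t).2.2 ↔ ∃ k : Int, 1 ≤ k ∧ k ≤ t ∧ x = c + k := by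
  simp only [pvS, List.mem_map, PySem.List.mem_pyRange_one]
  constructor
  · rintro ⟨k, ⟨h1, h2⟩, he⟩; exact ⟨k, h1, by omega, he.symm⟩
  · rintro ⟨k, h1, h2, he⟩; exact ⟨k, ⟨h1, by omega⟩, he.symm⟩

-- an i that cannot fire on any j of the inner range leaves the state unchanged
lemma pv_inner_noop (r c i t : Int)
    (h : ∀ j, c ≤ j → j < 8 →
      ¬ (r - (7 - c) ≤ i ∧ i < r ∧ c < j ∧ j ≤ c + (7 - c) ∧ i ∉ (pvS r c t).2.1 ∧ j ∉ (pvS r c t).2.2)) :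
    (PySem.List.pyRange c 8 1).foldl (pvStepA r c i) (pvS r c t) = pvS r c t := by
  apply pv_foldl_id
  intro j hj
  rw [PySem.List.mem_pyRange_one] at hj
  simp only [pvStepA, if_neg (h j hj.1 hj.2)]

-- appending the (t+1)-st move
lemma pv_S_succ (r c t : Int) (ht : 0 ≤ t) :
    pvS r c (t + 1)
      = ((pvS r c t).1 ++ [(r - (t + 1), c + (t + 1))],
         (pvS r c t).2.1 ++ [r - (t + 1)],
         (pvS r c t).2.2 ++ [c + (t + 1)]) := by
  have h : PySem.List.pyRange 1 (t + 1 + 1) 1 = PySem.List.pyRange 1 (t + 1) 1 ++ [t + 1] :=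
    PySem.List.pyRange_one_succ_right (by omega)
  simp only [pvS, h, List.map_append, List.map_cons, List.map_nil]

-- the live case: i = r - (t+1) with t+1 ≤ min r (7-c) generates exactly the next move
lemma pv_inner_fire (r c t : Int) (ht0 : 0 ≤ t)
    (ht : t + 1 ≤ min r (7 - c)) :
    (PySem.List.pyRange c 8 1).foldl (pvStepA r c (r - (t + 1))) (pvS r c t) = pvS r c (t + 1) := by
  set i : Int := r - (t + 1) with hi
  have hc7 : t + 1 ≤ 7 - c := le_trans ht (min_le_right _ _)
  have hcr : t + 1 ≤ r := le_trans ht (min_le_left _ _)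
  have hsplit : PySem.List.pyRange c 8 1
      = PySem.List.pyRange c (c + t + 1) 1 ++ PySem.List.pyRange (c + t + 1) 8 1 :=
    PySem.List.pyRange_one_append c (c + t + 1) 8 (by omega) (by omega)
  rw [hsplit, List.foldl_append]
  have hpre : (PySem.List.pyRange c (c + t + 1) 1).foldl (pvStepA r c i) (pvS r c t) = pvS r c t := by
    apply pv_foldl_id
    intro j hj
    rw [PySem.List.mem_pyRange_one] at hj
    simp only [pvStepA]
    rw [if_neg]
    rintro ⟨_, _, h3, _, _, h6⟩
    exact h6 ((pv_mem_cols r c t j).mpr ⟨j - c, by omega, by omega, by omega⟩)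
  rw [hpre]
  have hcons : PySem.List.pyRange (c + t + 1) 8 1
      = (c + t + 1) :: PySem.List.pyRange (c + t + 1 + 1) 8 1 :=
    PySem.List.pyRange_one_cons (by omega)
  rw [hcons, List.foldl_cons]
  have hfire : pvStepA r c i (pvS r c t) (c + t + 1) = pvS r c (t + 1) := by
    rw [pvStepA, if_pos]
    · rw [pv_S_succ r c t ht0]
      simp only [hi, add_assoc]
    · refine ⟨by omega, by omega, by omega, by omega, ?_, ?_⟩
      · rw [pv_mem_rows]; rintro ⟨k, h1, h2, he⟩; omega
      · rw [pv_mem_cols]; rintro ⟨k, h1, h2, he⟩; omega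
  rw [hfire]
  apply pv_foldl_id
  intro j hj
  rw [PySem.List.mem_pyRange_one] at hj
  simp only [pvStepA]
  rw [if_neg]
  rintro ⟨_, _, _, _, h5, _⟩
  exact h5 ((pv_mem_rows r c (t + 1) i).mpr ⟨t + 1, by omega, by omega, by omega⟩)

-- outer loop invariant: processing i, i-1, …, 0 completes the diagonal
lemma pv_outer (r c : Int) : ∀ n : Nat, ∀ i : Int, i ≤ r → (i + 1).toNat = n →
    (PySem.List.pyRange i (-1) (-1)).foldl
      (fun st i' => (PySem.List.pyRange c 8 1).foldl (pvStepA r c i') st)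
      (pvS r c (max 0 (min (r - i - 1) (min r (7 - c)))))
    = pvS r c (max 0 (min r (7 - c))) := by
  intro n
  induction n with
  | zero =>
      intro i hir hn
      have hineg : i ≤ -1 := by omega
      rw [PySem.List.pyRange_neg_one_eq_nil hineg, List.foldl_nil]
      congr 1
      omega
  | succ n ih =>
      intro i hir hn
      have hi0 : 0 ≤ i := by omega
      rw [PySem.List.pyRange_neg_one_cons (by omega), List.foldl_cons]
      set K : Int := min r (7 - c) with hK
      have hstep : (PySem.List.pyRange c 8 1).foldl (pvStepA r c i) (pvS r c (max 0 (min (r - i - 1) K)))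
          = pvS r c (max 0 (min (r - i) K)) := by
        by_cases hdone : K ≤ r - i - 1
        · -- every admissible j is already in columnsDone
          have ht : max 0 (min (r - i - 1) K) = max 0 K := by omega
          have ht2 : max 0 (min (r - i) K) = max 0 K := by omega
          rw [ht, ht2]
          apply pv_inner_noop
          intro j hcj hj8
          rintro ⟨h1, h2, h3, h4, _, h6⟩
          apply h6
          rw [pv_mem_cols]
          exact ⟨j - c, by omega, by omega, by omega⟩
        · by_cases hir' : i = r
          · -- the condition i < r never holds
            have ht : max 0 (min (r - i - 1) K) = max 0 (min (r - i) K) := by omega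
            rw [ht]
            apply pv_inner_noop
            intro j _ _
            rintro ⟨_, h2, _⟩
            omega
          · -- i = r - (t+1): exactly one append fires
            have h1 : max 0 (min (r - i - 1) K) = r - i - 1 := by omega
            have h2 : max 0 (min (r - i) K) = (r - i - 1) + 1 := by omega
            have h3 : i = r - ((r - i - 1) + 1) := by omega
            rw [h1, h2]
            have hfi := pv_inner_fire r c (r - i - 1) (by omega) (by omega)
            rw [← h3] at hfi
            exact hfi
      rw [hstep]
      have harg : max 0 (min (r - i) K) = max 0 (min (r - (i - 1) - 1) K) := by omega
      rw [harg]
      exact ih (i - 1) (by omega) (by omega)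

lemma pv_moves_eq (r c : Int) :
    ((PySem.List.pyRange r (-1) (-1)).foldl
      (fun st i => (PySem.List.pyRange c 8 1).foldl (pvStepA r c i) st) ([], [], []))
    = pvS r c (max 0 (min r (7 - c))) := by
  have h0 : pvS r c (max 0 (min (r - r - 1) (min r (7 - c))))
      = (([], [], []) : List (Int × Int) × List Int × List Int) := by
    have : max 0 (min (r - r - 1) (min r (7 - c))) = 0 := by omega
    rw [this]
    simp [pvS]
  have := pv_outer r c (r + 1).toNat r le_rfl rfl
  rwa [h0] at this

lemma pv_rc_not_mem (r c t : Int) : (r, c) ∉ (pvS r c t).1 := by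
  simp only [pvS, List.mem_map, PySem.List.mem_pyRange_one, Prod.mk.injEq]
  rintro ⟨k, ⟨h1, _⟩, hk1, _⟩
  omega

lemma pv_b_list (r c : Int) :
    (PySem.List.pyRange 1 (min r (7 - c) + 1) 1).map (fun k => (r - k, c + k))
    = (pvS r c (max 0 (min r (7 - c)))).1 := by
  by_cases h : 0 ≤ min r (7 - c)
  · simp only [pvS]
    congr 2
    omega
  · simp only [pvS,
      PySem.List.pyRange_one_eq_nil (by omega : min r (7 - c) + 1 ≤ 1),
      PySem.List.pyRange_one_eq_nil (by omega : max 0 (min r (7 - c)) + 1 ≤ 1),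
      List.map_nil]

-- ===== VERDICT (by name: the statement is the Claim_ definition above) =====
theorem possibleMovesRightUp_spec : Claim_equal_possibleMovesRightUp := by
  intro r c _
  show possibleMovesRightUp r c = possibleMovesRightUp_alt r c
  unfold possibleMovesRightUp possibleMovesRightUp_alt
  rw [pv_moves_eq, pv_b_list]
  simp only [if_neg (pv_rc_not_mem r c (max 0 (min r (7 - c))))]
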